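-- pv_equiv track=rewrite | github.com/dadelsul/contract-clause-segmentation | src/infer_segmenter.py | build_clauses_from_starts
-- ===== SOURCE A (Python) =====
-- def build_clauses_from_starts(raw_text: str, lines, pred_info):
--     """
--     نبني البنود بتجميع الأسطر:
--     كل ما جاء Start=1 نبدأ بند جديد.
--     """
--     clauses = []
--     current = []
--
--     for (line, _, _), (pred, prob) in zip(lines, pred_info):
--         # إذا هذا بداية بند ومو أول سطر → اقفل البند السابق
--         if pred == 1 and current:
--             clauses.append("\n".join(current).strip())
--             current = []
--
--         current.append(line)
--
--     if current:
--         clauses.append("\n".join(current).strip())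
--
--     # تنظيف البنود الفاضية
--     clauses = [c for c in clauses if c.strip()]
--     return clauses
-- ===== SOURCE B (Python) =====
-- def build_clauses_from_starts(raw_text: str, lines, pred_info):
--     # Recursive span decomposition: cut the paired sequence at each predicted
--     # start (pred == 1), join/strip each span, drop spans that strip to empty.
--     pairs = [(l[0], p[0]) for l, p in zip(lines, pred_info)]
--
--     def segs(ps):
--         if not ps:
--             return []
--         rest = ps[1:]
--         k = 0
--         while k < len(rest) and rest[k][1] != 1:   # take the non-start run
--             k += 1
--         clause = "\n".join([ps[0][0]] + [t for t, _ in rest[:k]]).strip()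
--         return [clause] + segs(rest[k:])
--
--     return [c for c in segs(pairs) if c.strip()]
-- ===== Notes on version B (the rewrite author's own statement) =====
-- stated objective: alternative
-- what changed: Replaces A's single loop with mutable clauses/current accumulators and a trailing flush by a recursive span decomposition: pair up line texts with predictions once, then recursively cut the sequence at each pred==1 boundary (takeWhile/dropWhile), joining and stripping each span.
import Mathlib
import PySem

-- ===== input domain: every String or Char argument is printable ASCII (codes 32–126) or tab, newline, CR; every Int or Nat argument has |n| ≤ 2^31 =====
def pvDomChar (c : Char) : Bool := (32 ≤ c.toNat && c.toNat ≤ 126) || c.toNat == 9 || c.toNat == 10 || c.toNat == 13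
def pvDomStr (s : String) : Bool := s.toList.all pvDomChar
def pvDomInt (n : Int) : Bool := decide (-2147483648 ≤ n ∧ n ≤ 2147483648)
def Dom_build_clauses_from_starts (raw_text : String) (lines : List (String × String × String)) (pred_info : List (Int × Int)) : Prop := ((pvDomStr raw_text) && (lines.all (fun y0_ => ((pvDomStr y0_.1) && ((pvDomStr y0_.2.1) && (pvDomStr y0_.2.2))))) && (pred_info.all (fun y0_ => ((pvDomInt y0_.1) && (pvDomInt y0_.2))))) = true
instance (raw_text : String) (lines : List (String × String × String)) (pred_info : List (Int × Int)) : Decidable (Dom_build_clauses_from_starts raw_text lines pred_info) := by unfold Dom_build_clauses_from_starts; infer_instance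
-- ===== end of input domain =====

-- B replaces A's accumulator loop by a recursive span decomposition (cut at each
-- predicted start, slice/join/strip each span); alternative decomposition, same cost.

-- ===== PORT A =====
-- literal transliteration of A: one fold over zip(lines, pred_info) carrying
-- (clauses, current), a trailing flush of current, then the emptiness filter.
def build_clauses_from_starts (_raw_text : String) (lines : List (String × String × String)) (pred_info : List (Int × Int)) : List String :=
  let st := (List.zip lines pred_info).foldl
    (fun (s : List String × List String) x =>
      let s' := if x.2.1 == 1 && !s.2.isEmpty
        then (s.1 ++ [PySem.Str.strip (PySem.Str.join "\n" s.2)], ([] : List String))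
        else s
      (s'.1, s'.2 ++ [x.1.1])) ([], [])
  let clauses := if st.2.isEmpty then st.1 else st.1 ++ [PySem.Str.strip (PySem.Str.join "\n" st.2)]
  clauses.filter (fun c => PySem.Str.strip c != "")

-- ===== PORT B =====
-- Source B's segs: strip/join the run of non-start lines after the head, recurse on the rest
def pvSegs : List (String × Int) → List String
  | [] => []
  | p :: rest =>
      PySem.Str.strip (PySem.Str.join "\n" (p.1 :: (rest.takeWhile (fun q => q.2 != 1)).map Prod.fst))
      :: pvSegs (rest.dropWhile (fun q => q.2 != 1))
termination_by l => l.length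
decreasing_by
  have := List.length_dropWhile_le (p := fun q : String × Int => q.2 != 1) (l := rest)
  simp; omega

def build_clauses_from_starts_alt (_raw_text : String) (lines : List (String × String × String)) (pred_info : List (Int × Int)) : List String :=
  let pairs := (List.zip lines pred_info).map (fun x => (x.1.1, x.2.1))
  (pvSegs pairs).filter (fun c => PySem.Str.strip c != "")

-- ===== PRECONDITION & SPEC =====
def Spec_build_clauses_from_starts (raw_text : String) (lines : List (String × String × String)) (pred_info : List (Int × Int)) (out : List String) : Prop := out = build_clauses_from_starts_alt raw_text lines pred_info
instance (raw_text : String) (lines : List (String × String × String)) (pred_info : List (Int × Int)) (out : List String) : Decidable (Spec_build_clauses_from_starts raw_text lines pred_info out) := by unfold Spec_build_clauses_from_starts; infer_instance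

-- ===== CLAIM (what is proved, stated in full; the proofs are below) =====
def Claim_equal_build_clauses_from_starts : Prop := ∀ (raw_text : String) (lines : List (String × String × String)) (pred_info : List (Int × Int)), Dom_build_clauses_from_starts raw_text lines pred_info → Spec_build_clauses_from_starts raw_text lines pred_info (build_clauses_from_starts raw_text lines pred_info)

-- ===== LEMMAS AND PROOFS =====

-- A's loop body, on the projected (text, pred) pair
def pvStep (s : List String × List String) (x : String × Int) : List String × List String :=
  let s' := if x.2 == 1 && !s.2.isEmpty
    then (s.1 ++ [PySem.Str.strip (PySem.Str.join "\n" s.2)], ([] : List String))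
    else s
  (s'.1, s'.2 ++ [x.1])

def pvFin (s : List String × List String) : List String :=
  if s.2.isEmpty then s.1 else s.1 ++ [PySem.Str.strip (PySem.Str.join "\n" s.2)]

theorem pvLoop_segs (ps : List (String × Int)) :
    ∀ (cl cur : List String), cur ≠ [] →
    pvFin (ps.foldl pvStep (cl, cur)) =
      cl ++ (PySem.Str.strip (PySem.Str.join "\n" (cur ++ (ps.takeWhile (fun q => q.2 != 1)).map Prod.fst))
             :: pvSegs (ps.dropWhile (fun q => q.2 != 1))) := by
  induction ps with
  | nil =>
      intro cl cur h
      simp [pvFin, pvSegs, h]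
  | cons x ps ih =>
      intro cl cur h
      by_cases hx : x.2 = 1
      · have hstep : pvStep (cl, cur) x
            = (cl ++ [PySem.Str.strip (PySem.Str.join "\n" cur)], [x.1]) := by
          simp [pvStep, hx, h]
        rw [List.foldl_cons, hstep,
          ih (cl ++ [PySem.Str.strip (PySem.Str.join "\n" cur)]) [x.1] (by simp)]
        simp [List.takeWhile, List.dropWhile, hx, pvSegs]
      · have hstep : pvStep (cl, cur) x = (cl, cur ++ [x.1]) := by
          simp [pvStep, hx]
        have hb : (x.2 != 1) = true := by simp [hx]
        rw [List.foldl_cons, hstep, ih cl (cur ++ [x.1]) (by simp)]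
        simp [List.takeWhile, List.dropWhile, hb]

theorem pvA_eq_segs (ps : List (String × Int)) :
    pvFin (ps.foldl pvStep ([], [])) = pvSegs ps := by
  cases ps with
  | nil => simp [pvFin, pvSegs]
  | cons x ps =>
      have hstep : pvStep ([], []) x = ([], [x.1]) := by
        simp [pvStep]
      rw [List.foldl_cons, hstep, pvLoop_segs ps [] [x.1] (by simp)]
      simp [pvSegs]

-- ===== VERDICT (by name: the statement is the Claim_ definition above) =====
theorem build_clauses_from_starts_spec : Claim_equal_build_clauses_from_starts := by
  intro raw_text lines pred_info _
  unfold Spec_build_clauses_from_starts build_clauses_from_starts build_clauses_from_starts_alt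
  have h : (List.zip lines pred_info).foldl
      (fun (s : List String × List String) x =>
        let s' := if x.2.1 == 1 && !s.2.isEmpty
          then (s.1 ++ [PySem.Str.strip (PySem.Str.join "\n" s.2)], ([] : List String))
          else s
        (s'.1, s'.2 ++ [x.1.1])) ([], [])
      = ((List.zip lines pred_info).map (fun x => (x.1.1, x.2.1))).foldl pvStep ([], []) := by
    rw [List.foldl_map]
    rfl
  simp only [h]
  rw [show ∀ s, (if (s : List String × List String).2.isEmpty then s.1
        else s.1 ++ [PySem.Str.strip (PySem.Str.join "\n" s.2)]) = pvFin s from fun _ => rfl,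
    pvA_eq_segs]
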